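-- pv_equiv track=rewrite | github.com/sucesso-associado/validador | src/routes/validador.py | extract_legal_representative_from_eu
-- ===== SOURCE A (Python) =====
-- def extract_legal_representative_from_eu(raw_text_content):
--     """
--     Tenta extrair o nome do representante legal que está após o trecho "Eu,".
--     """
--     representante_legal = None
--     start_index_eu = raw_text_content.find("Eu,")
--     if start_index_eu != -1:
--         substring_after_eu = raw_text_content[start_index_eu + len("Eu,"):].strip()
--         end_name_index = -1
--         if substring_after_eu:
--             delimiters = [',', '.', '\n', '(', ')', '[', ']', '-', '\r', ' e ', ' ou ', ' inscrito no ']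
--             found_indices = [substring_after_eu.lower().find(d) for d in delimiters if substring_after_eu.lower().find(d) != -1]
--             if found_indices:
--                 end_name_index = min(found_indices)
--         if end_name_index != -1:
--             representante_legal = substring_after_eu[:end_name_index].strip()
--         else:
--             representante_legal = substring_after_eu.split('\n')[0].strip()
--             if len(representante_legal) > 100:
--                 representante_legal = representante_legal[:100].strip() + "..."
--         representante_legal = representante_legal.replace('"', '').replace("'", '').strip()
--     return representante_legal
-- ===== SOURCE B (Python) =====
-- def extract_legal_representative_from_eu(raw_text_content):
--     """Single left-to-right scan for the earliest delimiter instead of min() over per-delimiter find() passes."""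
--     pos = raw_text_content.find("Eu,")
--     if pos == -1:
--         return None
--     s = raw_text_content[pos + 3:].strip()
--     low = s.lower()
--     delims = (',', '.', '\n', '(', ')', '[', ']', '-', '\r', ' e ', ' ou ', ' inscrito no ')
--     cut = -1
--     for j in range(len(low)):
--         if any(low.startswith(d, j) for d in delims):
--             cut = j
--             break
--     if cut != -1:
--         name = s[:cut].strip()
--     else:
--         name = s.split('\n')[0].strip()
--         if len(name) > 100:
--             name = name[:100].strip() + "..."
--     return name.replace('"', '').replace("'", '').strip()
-- ===== Notes on version B (the rewrite author's own statement) =====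
-- stated objective: alternative
-- what changed: The earliest-delimiter position is found by one left-to-right scan checking all delimiters at each position, instead of A's min() over a comprehension of twelve separate per-delimiter .find() passes; the surrounding Eu,-location, fallback and quote-stripping logic is unchanged.
import Mathlib
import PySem

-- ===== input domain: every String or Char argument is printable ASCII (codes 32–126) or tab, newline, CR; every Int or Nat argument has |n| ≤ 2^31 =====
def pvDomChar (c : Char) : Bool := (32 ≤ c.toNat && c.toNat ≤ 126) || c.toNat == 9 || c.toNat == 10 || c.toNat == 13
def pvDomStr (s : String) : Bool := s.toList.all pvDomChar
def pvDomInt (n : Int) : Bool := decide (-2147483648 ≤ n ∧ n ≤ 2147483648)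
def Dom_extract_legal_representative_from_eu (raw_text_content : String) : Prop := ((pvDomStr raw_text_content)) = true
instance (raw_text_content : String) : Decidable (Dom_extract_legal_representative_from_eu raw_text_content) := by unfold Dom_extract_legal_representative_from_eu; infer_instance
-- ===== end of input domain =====

-- B replaces A's min() over twelve per-delimiter .find() passes by one left-to-right scan
-- for the earliest delimiter occurrence (objective: alternative; same surrounding branches).

-- ===== PORT A =====
-- the delimiter list of A, as lists of chars
def euDelims : List (List Char) :=
  [[','], ['.'], ['\n'], ['('], [')'], ['['], [']'], ['-'], ['\r'],
   " e ".toList, " ou ".toList, " inscrito no ".toList]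

def extract_legal_representative_from_eu (raw_text_content : String) : Option String :=
  let start_index_eu := PySem.Str.find raw_text_content "Eu,"
  if start_index_eu ≠ -1 then
    let substring_after_eu :=
      PySem.Chars.strip (PySem.Chars.slice raw_text_content.toList (some (start_index_eu + 3)) none)
    -- found_indices is only built when substring_after_eu is truthy (A's 'if substring_after_eu:')
    let found_indices : List Int :=
      if substring_after_eu ≠ [] then
        euDelims.foldl (fun acc d =>
          if PySem.Chars.find (PySem.Chars.lower substring_after_eu) d != -1 then
            acc ++ [PySem.Chars.find (PySem.Chars.lower substring_after_eu) d]
          else acc) []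
      else []
    let end_name_index : Int :=
      if found_indices ≠ [] then (PySem.List.min? found_indices id).getD (-1) else -1
    let representante_legal :=
      if end_name_index ≠ -1 then
        PySem.Chars.strip (PySem.Chars.slice substring_after_eu none (some end_name_index))
      else
        let first_line := PySem.Chars.strip ((PySem.Chars.splitOn substring_after_eu ['\n']).headD [])
        if 100 < PySem.Chars.len first_line then
          PySem.Chars.strip (PySem.Chars.slice first_line none (some 100)) ++ "...".toList
        else first_line
    some (String.ofList (PySem.Chars.strip
      (PySem.Chars.replace (PySem.Chars.replace representante_legal ['"'] []) ['\''] [])))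
  else none

-- ===== PORT B =====
-- B's scan loop: first index j at which some delimiter starts, else -1
def euScan : List Char → Int → Int
  | [], _ => -1
  | cs@(_ :: rest), j =>
    if euDelims.any (fun d => PySem.Chars.startswith cs d) then j else euScan rest (j + 1)

def extract_legal_representative_from_eu_alt (raw_text_content : String) : Option String :=
  let pos := PySem.Str.find raw_text_content "Eu,"
  if pos = -1 then none
  else
    let s := PySem.Chars.strip (PySem.Chars.slice raw_text_content.toList (some (pos + 3)) none)
    let low := PySem.Chars.lower s
    let cut := euScan low 0
    let name :=
      if cut ≠ -1 then
        PySem.Chars.strip (PySem.Chars.slice s none (some cut))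
      else
        let nm := PySem.Chars.strip ((PySem.Chars.splitOn s ['\n']).headD [])
        if 100 < PySem.Chars.len nm then
          PySem.Chars.strip (PySem.Chars.slice nm none (some 100)) ++ "...".toList
        else nm
    some (String.ofList (PySem.Chars.strip
      (PySem.Chars.replace (PySem.Chars.replace name ['"'] []) ['\''] [])))

-- ===== PRECONDITION & SPEC =====
def Spec_extract_legal_representative_from_eu (raw_text_content : String) (out : Option String) : Prop := out = extract_legal_representative_from_eu_alt raw_text_content
instance (raw_text_content : String) (out : Option String) : Decidable (Spec_extract_legal_representative_from_eu raw_text_content out) := by unfold Spec_extract_legal_representative_from_eu; infer_instance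

-- ===== CLAIM (what is proved, stated in full; the proofs are below) =====
def Claim_equal_extract_legal_representative_from_eu : Prop := ∀ (raw_text_content : String), Dom_extract_legal_representative_from_eu raw_text_content → Spec_extract_legal_representative_from_eu raw_text_content (extract_legal_representative_from_eu raw_text_content)

-- ===== LEMMAS AND PROOFS =====

def euHitB (L : List Char) (k : Nat) : Bool :=
  euDelims.any (fun d => PySem.Chars.startswith (L.drop k) d)

lemma euDelims_ne_nil : ∀ d ∈ euDelims, d ≠ [] := by decide

lemma euScan_of_no_hit (L : List Char) (j : Int)
    (h : ∀ d ∈ euDelims, ¬ d <:+: L) : euScan L j = -1 := by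
  induction L generalizing j with
  | nil => rfl
  | cons c rest ih =>
    rw [euScan]
    have hg : euDelims.any (fun d => PySem.Chars.startswith (c :: rest) d) = false := by
      simp only [List.any_eq_false]
      intro d hd hs
      exact h d hd ((PySem.Chars.startswith_iff _ _).1 hs).isInfix
    rw [hg]
    simp only [Bool.false_eq_true, if_false]
    exact ih (j + 1) (fun d hd hinf => h d hd (List.infix_cons hinf))

lemma euScan_of_least_hit (L : List Char) (j : Int) (k : Nat)
    (hk : euHitB L k = true) (hmin : ∀ i < k, euHitB L i = false) :
    euScan L j = j + k := by
  induction L generalizing j k with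
  | nil =>
    exfalso
    simp only [euHitB, List.drop_nil, List.any_eq_true] at hk
    obtain ⟨d, hd, hs⟩ := hk
    exact euDelims_ne_nil d hd (List.prefix_nil.1 ((PySem.Chars.startswith_iff _ _).1 hs))
  | cons c rest ih =>
    rw [euScan]
    by_cases hg : euDelims.any (fun d => PySem.Chars.startswith (c :: rest) d) = true
    · rw [hg]
      simp only [if_true]
      have hk0 : k = 0 := by
        by_contra hne
        have := hmin 0 (Nat.pos_of_ne_zero hne)
        simp only [euHitB, List.drop_zero] at this
        rw [this] at hg; exact Bool.false_ne_true hg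
      subst hk0; simp
    · rw [Bool.not_eq_true] at hg
      rw [hg]
      simp only [Bool.false_eq_true, if_false]
      have hk0 : k ≠ 0 := by
        intro h0; subst h0
        simp only [euHitB, List.drop_zero] at hk
        rw [hk] at hg; cases hg
      obtain ⟨k', rfl⟩ := Nat.exists_eq_succ_of_ne_zero hk0
      have hk' : euHitB rest k' = true := by
        simpa only [euHitB, List.drop_succ_cons] using hk
      have hmin' : ∀ i < k', euHitB rest i = false := by
        intro i hi
        have := hmin (i + 1) (Nat.succ_lt_succ hi)
        simpa only [euHitB, List.drop_succ_cons] using this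
      rw [ih (j + 1) k' hk' hmin']
      push_cast; ring

lemma euCore (L : List Char) :
    (if (euDelims.foldl (fun acc d =>
        if PySem.Chars.find L d != -1 then acc ++ [PySem.Chars.find L d] else acc) []) ≠ [] then
      (PySem.List.min? (euDelims.foldl (fun acc d =>
        if PySem.Chars.find L d != -1 then acc ++ [PySem.Chars.find L d] else acc) []) id).getD (-1)
    else -1) = euScan L 0 := by
  rw [PySem.List.foldl_append_if (fun d => PySem.Chars.find L d != -1) (fun d => PySem.Chars.find L d) euDelims []]
  simp only [List.nil_append]
  by_cases hL : ∀ d ∈ euDelims, ¬ d <:+: L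
  · have hfil : euDelims.filter (fun d => PySem.Chars.find L d != -1) = [] := by
      rw [List.filter_eq_nil_iff]
      intro d hd
      simp only [bne_iff_ne, ne_eq, not_not]
      exact (PySem.Chars.find_eq_neg_one_iff L d).2 (hL d hd)
    rw [hfil]
    simp [euScan_of_no_hit L 0 hL]
  · push Not at hL
    obtain ⟨d0, hd0, hinf0⟩ := hL
    have hex : ∃ k, euHitB L k = true := by
      obtain ⟨j, hj⟩ := (PySem.Chars.exists_prefix_drop_iff_isIn d0 L).2
        ((PySem.Chars.isIn_iff_infix d0 L).2 hinf0)
      exact ⟨j, by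
        simp only [euHitB, List.any_eq_true]
        exact ⟨d0, hd0, (PySem.Chars.startswith_iff _ _).2 hj⟩⟩
    set k := Nat.find hex with hkdef
    have hkhit : euHitB L k = true := Nat.find_spec hex
    have hkmin : ∀ i < k, euHitB L i = false := fun i hi =>
      Bool.eq_false_iff.2 (Nat.find_min hex hi)
    -- the found list is nonempty
    have hfind0 : PySem.Chars.find L d0 != -1 :=
      bne_iff_ne.2 ((PySem.Chars.find_ne_neg_one_iff L d0).2 hinf0)
    have hmem0 : PySem.Chars.find L d0 ∈
        (euDelims.filter (fun d => PySem.Chars.find L d != -1)).map (fun d => PySem.Chars.find L d) :=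
      List.mem_map_of_mem (List.mem_filter.2 ⟨hd0, hfind0⟩)
    have hne : (euDelims.filter (fun d => PySem.Chars.find L d != -1)).map (fun d => PySem.Chars.find L d) ≠ [] :=
      List.ne_nil_of_mem hmem0
    rw [if_pos hne]
    obtain ⟨m, hm⟩ : ∃ m, PySem.List.min? ((euDelims.filter (fun d => PySem.Chars.find L d != -1)).map (fun d => PySem.Chars.find L d)) id = some m := by
      cases hc : PySem.List.min? ((euDelims.filter (fun d => PySem.Chars.find L d != -1)).map (fun d => PySem.Chars.find L d)) id with
      | none => exact absurd ((PySem.List.min?_eq_none_iff _ _).1 hc) hne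
      | some m => exact ⟨m, rfl⟩
    rw [hm, Option.getD_some]
    -- m = k
    have hmmem := PySem.List.min?_mem hm
    obtain ⟨d1, hd1f, hd1eq⟩ := List.mem_map.1 hmmem
    have hd1mem : d1 ∈ euDelims := (List.mem_filter.1 hd1f).1
    have hd1ne : PySem.Chars.find L d1 ≠ -1 := by
      have := (List.mem_filter.1 hd1f).2
      simpa [bne_iff_ne] using this
    have hm0 : 0 ≤ m := by
      rw [← hd1eq]
      exact (PySem.Chars.find_nonneg_iff L d1).2 ((PySem.Chars.find_ne_neg_one_iff L d1).1 hd1ne)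
    have h01 : 0 ≤ PySem.Chars.find L d1 := hd1eq.symm ▸ hm0
    have hmspec := PySem.Chars.find_spec (s := L) (sub := d1) h01
    -- k ≤ m
    have hklem : k ≤ m.toNat := by
      apply Nat.find_le
      simp only [euHitB, List.any_eq_true]
      refine ⟨d1, hd1mem, (PySem.Chars.startswith_iff _ _).2 ?_⟩
      rw [← hd1eq]
      exact hmspec.1
    -- m ≤ k : from the hit at k
    have hmk : m ≤ (k : Int) := by
      obtain ⟨d2, hd2mem, hs2⟩ := List.any_eq_true.1 hkhit
      have hpre2 : d2 <+: L.drop k := (PySem.Chars.startswith_iff _ _).1 hs2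
      have hinf2 : d2 <:+: L := by
        have : ∃ j, d2 <+: L.drop j := ⟨k, hpre2⟩
        exact (PySem.Chars.isIn_iff_infix d2 L).1 ((PySem.Chars.exists_prefix_drop_iff_isIn d2 L).1 this)
      have hne2 : PySem.Chars.find L d2 ≠ -1 := (PySem.Chars.find_ne_neg_one_iff L d2).2 hinf2
      have h02 : 0 ≤ PySem.Chars.find L d2 := (PySem.Chars.find_nonneg_iff L d2).2 hinf2
      have hspec2 := PySem.Chars.find_spec (s := L) (sub := d2) h02
      have hle2 : (PySem.Chars.find L d2).toNat ≤ k := by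
        by_contra hlt
        exact hspec2.2 k (by omega) hpre2
      have hmem2 : PySem.Chars.find L d2 ∈
          (euDelims.filter (fun d => PySem.Chars.find L d != -1)).map (fun d => PySem.Chars.find L d) :=
        List.mem_map_of_mem (List.mem_filter.2 ⟨hd2mem, by simpa [bne_iff_ne] using hne2⟩)
      have := PySem.List.min?_isMin hm _ hmem2
      simp only [id] at this
      omega
    have hmeqk : m = (k : Int) := by omega
    rw [hmeqk, euScan_of_least_hit L 0 k hkhit hkmin]
    omega

-- ===== VERDICT (by name: the statement is the Claim_ definition above) =====
theorem extract_legal_representative_from_eu_spec : Claim_equal_extract_legal_representative_from_eu := by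
  intro raw _
  show extract_legal_representative_from_eu raw = extract_legal_representative_from_eu_alt raw
  unfold extract_legal_representative_from_eu extract_legal_representative_from_eu_alt
  by_cases h : PySem.Str.find raw "Eu," = -1
  · simp only [h, ne_eq, not_true_eq_false, if_false, if_pos]
  · simp only [h, ne_eq, not_false_eq_true, if_true, if_false]
    set sub := PySem.Chars.strip (PySem.Chars.slice raw.toList (some (PySem.Str.find raw "Eu," + 3)) none) with hsub
    by_cases hs : sub = []
    · simp [hs, PySem.Chars.lower, euScan]
    · rw [if_pos hs, euCore (PySem.Chars.lower sub)]
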